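-- pv_equiv track=rewrite | github.com/julius-thomas/fl-ms-thesis | src/datasets/mimic4.py | _dx_chapter
-- ===== SOURCE A (Python) =====
-- _ICD9_DX_RANGES = [
--     (1, 139, 'infectious'), (140, 239, 'neoplasms'), (240, 279, 'endocrine'),
--     (280, 289, 'blood'), (290, 319, 'mental'), (320, 389, 'nervous'),
--     (390, 459, 'circulatory'), (460, 519, 'respiratory'), (520, 579, 'digestive'),
--     (580, 629, 'genitourinary'), (630, 679, 'pregnancy'), (680, 709, 'skin'),
--     (710, 739, 'musculoskeletal'), (740, 759, 'congenital'), (760, 779, 'perinatal'),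
--     (780, 799, 'symptoms'), (800, 999, 'injury'),
-- ]
--
-- _ICD10_DX_LETTER = {
--     'A': 'infectious', 'B': 'infectious', 'C': 'neoplasms',
--     'E': 'endocrine', 'F': 'mental', 'G': 'nervous', 'H': 'nervous',
--     'I': 'circulatory', 'J': 'respiratory', 'K': 'digestive',
--     'L': 'skin', 'M': 'musculoskeletal', 'N': 'genitourinary',
--     'O': 'pregnancy', 'P': 'perinatal', 'Q': 'congenital',
--     'R': 'symptoms', 'S': 'injury', 'T': 'injury',
--     'V': 'external', 'W': 'external', 'X': 'external', 'Y': 'external',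
--     'Z': 'supplementary',
-- }
--
-- def _dx_chapter(code, version):
--     """Map an ICD diagnosis code to a unified clinical chapter."""
--     code = str(code).strip()
--     if version == 9:
--         if code.startswith('E'):
--             return 'external'
--         if code.startswith('V'):
--             return 'supplementary'
--         try:
--             n = int(code[:3])
--         except ValueError:
--             return 'other'
--         for lo, hi, ch in _ICD9_DX_RANGES:
--             if lo <= n <= hi:
--                 return ch
--         return 'other'
--     else:
--         if not code:
--             return 'other'
--         letter = code[0].upper()
--         if letter == 'D':
--             try:
--                 return 'neoplasms' if int(code[1:3]) < 50 else 'blood'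
--             except (ValueError, IndexError):
--                 return 'neoplasms'
--         return _ICD10_DX_LETTER.get(letter, 'other')
-- ===== SOURCE B (Python) =====
-- _ICD9_BOUNDS = (139, 239, 279, 289, 319, 389, 459, 519, 579, 629, 679, 709, 739, 759, 779, 799, 999)
-- _ICD9_CHAPTERS = ('infectious', 'neoplasms', 'endocrine', 'blood', 'mental', 'nervous',
--                   'circulatory', 'respiratory', 'digestive', 'genitourinary', 'pregnancy',
--                   'skin', 'musculoskeletal', 'congenital', 'perinatal', 'symptoms', 'injury')
-- _ICD10_CHAPTERS = ('infectious', 'infectious', 'neoplasms', 'other', 'endocrine', 'mental',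
--                    'nervous', 'nervous', 'circulatory', 'respiratory', 'digestive', 'skin',
--                    'musculoskeletal', 'genitourinary', 'pregnancy', 'perinatal', 'congenital',
--                    'symptoms', 'injury', 'injury', 'other', 'external', 'external', 'external',
--                    'external', 'supplementary')
--
-- def _dx_chapter(code, version):
--     """Map an ICD diagnosis code to a unified clinical chapter."""
--     code = str(code).strip()
--     if version == 9:
--         if code.startswith('E'):
--             return 'external'
--         if code.startswith('V'):
--             return 'supplementary'
--         try:
--             n = int(code[:3])
--         except ValueError:
--             return 'other'
--         if n < 1 or n > 999:
--             return 'other'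
--         lo, hi = 0, len(_ICD9_BOUNDS)
--         while lo < hi:
--             mid = (lo + hi) // 2
--             if _ICD9_BOUNDS[mid] < n:
--                 lo = mid + 1
--             else:
--                 hi = mid
--         return _ICD9_CHAPTERS[lo]
--     if not code:
--         return 'other'
--     letter = code[0].upper()
--     if letter == 'D':
--         try:
--             return 'neoplasms' if int(code[1:3]) < 50 else 'blood'
--         except ValueError:
--             return 'neoplasms'
--     o = ord(letter) - 65
--     return _ICD10_CHAPTERS[o] if 0 <= o < 26 else 'other'
-- ===== Notes on version B (the rewrite author's own statement) =====
-- stated objective: alternative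
-- what changed: The ICD-9 linear scan over 17 (lo,hi,chapter) ranges is replaced by a binary search over a sorted upper-bound table (after an explicit 1..999 range guard), and the ICD-10 letter dict is replaced by direct indexing of a 26-entry chapter table with ord(letter)-65.
import Mathlib
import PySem

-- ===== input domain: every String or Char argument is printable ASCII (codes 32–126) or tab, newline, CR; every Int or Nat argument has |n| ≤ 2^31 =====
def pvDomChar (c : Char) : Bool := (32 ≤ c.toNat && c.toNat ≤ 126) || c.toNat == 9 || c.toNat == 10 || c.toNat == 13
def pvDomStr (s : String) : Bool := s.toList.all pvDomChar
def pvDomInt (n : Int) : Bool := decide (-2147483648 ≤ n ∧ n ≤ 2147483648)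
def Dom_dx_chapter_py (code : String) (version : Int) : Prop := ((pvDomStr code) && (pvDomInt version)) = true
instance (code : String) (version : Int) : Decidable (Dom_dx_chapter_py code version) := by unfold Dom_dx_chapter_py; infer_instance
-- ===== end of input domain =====

-- B replaces A's linear scan of ICD-9 ranges by a binary search over an upper-bound table and
-- A's letter→chapter dict by direct indexing of a 26-entry table with ord(letter)-65 (objective: alternative data structure).

-- ===== PORT A =====
def pvIcd9Ranges : List (Int × Int × String) :=
  [(1,139,"infectious"), (140,239,"neoplasms"), (240,279,"endocrine"),
   (280,289,"blood"), (290,319,"mental"), (320,389,"nervous"),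
   (390,459,"circulatory"), (460,519,"respiratory"), (520,579,"digestive"),
   (580,629,"genitourinary"), (630,679,"pregnancy"), (680,709,"skin"),
   (710,739,"musculoskeletal"), (740,759,"congenital"), (760,779,"perinatal"),
   (780,799,"symptoms"), (800,999,"injury")]

-- the 'for lo, hi, ch in _ICD9_DX_RANGES: if lo <= n <= hi: return ch' loop with its early return
def pvIcd9Scan : List (Int × Int × String) → Int → String
  | [], _ => "other"
  | (lo, hi, ch) :: rest, n => if lo ≤ n ∧ n ≤ hi then ch else pvIcd9Scan rest n

def pvIcd10Dict : PySem.Dict Char String := PySem.Dict.ofList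
  [('A',"infectious"),('B',"infectious"),('C',"neoplasms"),('E',"endocrine"),('F',"mental"),
   ('G',"nervous"),('H',"nervous"),('I',"circulatory"),('J',"respiratory"),('K',"digestive"),
   ('L',"skin"),('M',"musculoskeletal"),('N',"genitourinary"),('O',"pregnancy"),('P',"perinatal"),
   ('Q',"congenital"),('R',"symptoms"),('S',"injury"),('T',"injury"),('V',"external"),
   ('W',"external"),('X',"external"),('Y',"external"),('Z',"supplementary")]

def dx_chapter_py (code : String) (version : Int) : String :=
  let cs := PySem.Chars.strip code.toList
  if version = 9 then
    if PySem.Chars.startswith cs ['E'] then "external"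
    else if PySem.Chars.startswith cs ['V'] then "supplementary"
    else
      match PySem.Int.ofChars? (PySem.List.slice cs none (some 3)) with
      | none => "other"
      | some n => pvIcd9Scan pvIcd9Ranges n
  else
    match cs with
    | [] => "other"
    | c :: _ =>
      let letter := PySem.Chars.upperChar c
      if letter = 'D' then
        match PySem.Int.ofChars? (PySem.List.slice cs (some 1) (some 3)) with
        | none => "neoplasms"
        | some m => if m < 50 then "neoplasms" else "blood"
      else pvIcd10Dict.getD letter "other"

-- ===== PORT B =====
def pvIcd9Bounds : List Int := [139,239,279,289,319,389,459,519,579,629,679,709,739,759,779,799,999]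

def pvIcd9Chapters : List String :=
  ["infectious","neoplasms","endocrine","blood","mental","nervous","circulatory","respiratory",
   "digestive","genitourinary","pregnancy","skin","musculoskeletal","congenital","perinatal",
   "symptoms","injury"]

def pvIcd10Chapters : List String :=
  ["infectious","infectious","neoplasms","other","endocrine","mental","nervous","nervous",
   "circulatory","respiratory","digestive","skin","musculoskeletal","genitourinary","pregnancy",
   "perinatal","congenital","symptoms","injury","injury","other","external","external","external",
   "external","supplementary"]

-- Source B's 'while lo < hi' binary-search loop; the fuel only bounds the iteration count (17 ≥ any
-- possible number of halvings of an interval of length 17) and is never exhausted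
def pvBisect (fuel : Nat) (n lo hi : Int) : Int :=
  match fuel with
  | 0 => lo
  | f+1 =>
    if lo < hi then
      let mid := PySem.Int.floordiv (lo + hi) 2
      if PySem.List.pyGetD pvIcd9Bounds mid 0 < n then pvBisect f n (mid+1) hi
      else pvBisect f n lo mid
    else lo

def dx_chapter_py_alt (code : String) (version : Int) : String :=
  let cs := PySem.Chars.strip code.toList
  if version = 9 then
    if PySem.Chars.startswith cs ['E'] then "external"
    else if PySem.Chars.startswith cs ['V'] then "supplementary"
    else
      match PySem.Int.ofChars? (PySem.List.slice cs none (some 3)) with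
      | none => "other"
      | some n =>
        if n < 1 ∨ 999 < n then "other"
        else PySem.List.pyGetD pvIcd9Chapters (pvBisect 17 n 0 17) "other"
  else
    match cs with
    | [] => "other"
    | c :: _ =>
      let letter := PySem.Chars.upperChar c
      if letter = 'D' then
        match PySem.Int.ofChars? (PySem.List.slice cs (some 1) (some 3)) with
        | none => "neoplasms"
        | some m => if m < 50 then "neoplasms" else "blood"
      else
        let o : Int := (letter.toNat : Int) - 65
        if 0 ≤ o ∧ o < 26 then PySem.List.pyGetD pvIcd10Chapters o "other" else "other"

-- ===== PRECONDITION & SPEC =====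
def Spec_dx_chapter_py (code : String) (version : Int) (out : String) : Prop := out = dx_chapter_py_alt code version
instance (code : String) (version : Int) (out : String) : Decidable (Spec_dx_chapter_py code version out) := by unfold Spec_dx_chapter_py; infer_instance

-- ===== CLAIM (what is proved, stated in full; the proofs are below) =====
def Claim_equal_dx_chapter_py : Prop := ∀ (code : String) (version : Int), Dom_dx_chapter_py code version → Spec_dx_chapter_py code version (dx_chapter_py code version)

-- ===== LEMMAS AND PROOFS =====

-- A's scan returns "other" when no range matches
theorem pvIcd9Scan_other (L : List (Int × Int × String)) (n : Int)
    (h : ∀ t ∈ L, ¬(t.1 ≤ n ∧ n ≤ t.2.1)) : pvIcd9Scan L n = "other" := by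
  induction L with
  | nil => rfl
  | cons t rest ih =>
    obtain ⟨lo, hi, ch⟩ := t
    simp only [pvIcd9Scan]
    rw [if_neg (h _ (List.mem_cons_self))]
    exact ih (fun t ht => h t (List.mem_cons_of_mem _ ht))

-- scan and binary-search table agree on every n in 1..999 (checked by evaluation)
set_option maxRecDepth 8192 in
set_option maxHeartbeats 4000000 in
theorem pvIcd9_table_check :
    (PySem.List.pyRange 1 1000 1).all
      (fun m => pvIcd9Scan pvIcd9Ranges m ==
        PySem.List.pyGetD pvIcd9Chapters (pvBisect 17 m 0 17) "other") = true := by decide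

theorem pvIcd9_eq (n : Int) :
    pvIcd9Scan pvIcd9Ranges n =
      (if n < 1 ∨ 999 < n then "other"
       else PySem.List.pyGetD pvIcd9Chapters (pvBisect 17 n 0 17) "other") := by
  by_cases h : n < 1 ∨ 999 < n
  · rw [if_pos h]
    apply pvIcd9Scan_other
    intro t ht
    fin_cases ht <;> dsimp <;> omega
  · rw [if_neg h]
    have hmem : n ∈ PySem.List.pyRange 1 1000 1 := by
      rw [PySem.List.mem_pyRange_one]; omega
    exact eq_of_beq (List.all_eq_true.mp pvIcd9_table_check n hmem)

-- A's dict lookup and B's 26-entry table agree on every character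
theorem pvLetter_eq (c : Char) :
    pvIcd10Dict.getD c "other" =
      (if 0 ≤ (c.toNat : Int) - 65 ∧ (c.toNat : Int) - 65 < 26 then
        PySem.List.pyGetD pvIcd10Chapters ((c.toNat : Int) - 65) "other" else "other") := by
  by_cases hr : 65 ≤ c.toNat ∧ c.toNat ≤ 90
  · obtain ⟨m, h1, h2, rfl⟩ : ∃ m, 65 ≤ m ∧ m ≤ 90 ∧ c = Char.ofNat m :=
      ⟨c.toNat, hr.1, hr.2, (Char.ofNat_toNat c).symm⟩
    interval_cases m <;> decide
  · rw [if_neg (by omega)]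
    have key : ∀ d : Char, 65 ≤ d.toNat → d.toNat ≤ 90 → (d == c) = false := by
      intro d hd1 hd2
      rw [beq_eq_false_iff_ne]
      rintro rfl; omega
    simp [pvIcd10Dict, PySem.Dict.ofList, PySem.Dict.getD, PySem.Dict.get?, PySem.Dict.update,
      PySem.Dict.insert, PySem.Dict.empty, PySem.Dict.contains, List.find?,
      key 'A' (by decide) (by decide), key 'B' (by decide) (by decide), key 'C' (by decide) (by decide),
      key 'E' (by decide) (by decide), key 'F' (by decide) (by decide), key 'G' (by decide) (by decide),
      key 'H' (by decide) (by decide), key 'I' (by decide) (by decide), key 'J' (by decide) (by decide),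
      key 'K' (by decide) (by decide), key 'L' (by decide) (by decide), key 'M' (by decide) (by decide),
      key 'N' (by decide) (by decide), key 'O' (by decide) (by decide), key 'P' (by decide) (by decide),
      key 'Q' (by decide) (by decide), key 'R' (by decide) (by decide), key 'S' (by decide) (by decide),
      key 'T' (by decide) (by decide), key 'V' (by decide) (by decide), key 'W' (by decide) (by decide),
      key 'X' (by decide) (by decide), key 'Y' (by decide) (by decide), key 'Z' (by decide) (by decide)]

theorem pvDx_eq (code : String) (version : Int) :
    dx_chapter_py code version = dx_chapter_py_alt code version := by
  simp only [dx_chapter_py, dx_chapter_py_alt]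
  by_cases hv : version = 9
  · rw [if_pos hv, if_pos hv]
    by_cases hE : PySem.Chars.startswith (PySem.Chars.strip code.toList) ['E'] = true
    · rw [if_pos hE, if_pos hE]
    · rw [if_neg hE, if_neg hE]
      by_cases hV : PySem.Chars.startswith (PySem.Chars.strip code.toList) ['V'] = true
      · rw [if_pos hV, if_pos hV]
      · rw [if_neg hV, if_neg hV]
        cases h : PySem.Int.ofChars? (PySem.List.slice (PySem.Chars.strip code.toList) none (some 3)) with
        | none => rfl
        | some n => exact pvIcd9_eq n
  · rw [if_neg hv, if_neg hv]
    cases hcs : PySem.Chars.strip code.toList with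
    | nil => rfl
    | cons c rest =>
      dsimp only
      by_cases hD : PySem.Chars.upperChar c = 'D'
      · rw [if_pos hD, if_pos hD]
      · rw [if_neg hD, if_neg hD]
        exact pvLetter_eq (PySem.Chars.upperChar c)

-- ===== VERDICT (by name: the statement is the Claim_ definition above) =====
theorem dx_chapter_py_spec : Claim_equal_dx_chapter_py := by
  intro code version _
  exact pvDx_eq code version
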